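-- pv_equiv track=rewrite | github.com/AliAkbar-code/Python_assessment | 22_11_2025/debugging.py | box_generator
-- ===== SOURCE A (Python) =====
-- def box_generator(total_boxes):
--     """Rice doubles each box."""
--     rice = 1
--     total = 0
--
--     for box in range(1, total_boxes + 1):
--         total += rice
--         formula = f"{rice//2}*2" if box > 1 else "1"
--         yield box, formula, rice, total
--         rice *= 2
-- ===== SOURCE B (Python) =====
-- def box_generator(total_boxes):
--     # Stateless: each yielded tuple is computed in closed form from the box index.
--     for box in range(1, total_boxes + 1):
--         rice = 1 << (box - 1)
--         total = (1 << box) - 1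
--         formula = f"{1 << (box - 2)}*2" if box > 1 else "1"
--         yield box, formula, rice, total
-- ===== Notes on version B (the rewrite author's own statement) =====
-- stated objective: alternative
-- what changed: Replaced the running rice/total accumulators with stateless closed-form arithmetic per box: rice = 2^(box-1) via shift and total = 2^box - 1 (geometric series), so each tuple depends only on the index.
import Mathlib
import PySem

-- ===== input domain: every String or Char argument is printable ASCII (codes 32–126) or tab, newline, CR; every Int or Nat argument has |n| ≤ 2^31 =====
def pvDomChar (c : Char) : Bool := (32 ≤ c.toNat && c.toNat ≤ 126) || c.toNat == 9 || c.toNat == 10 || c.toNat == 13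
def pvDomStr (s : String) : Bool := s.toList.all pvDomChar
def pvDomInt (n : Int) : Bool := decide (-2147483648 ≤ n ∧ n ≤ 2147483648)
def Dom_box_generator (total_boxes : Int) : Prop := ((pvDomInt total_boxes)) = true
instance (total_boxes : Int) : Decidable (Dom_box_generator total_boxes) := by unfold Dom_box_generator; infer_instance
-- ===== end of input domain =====

-- B replaces A's running rice/total accumulators with closed-form per-box arithmetic (alternative decomposition, same cost).

-- ===== PORT A =====
-- the generator materialised as the list of its yields; state (rice, total, acc)
def box_generator (total_boxes : Int) : List (Int × String × Int × Int) :=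
  ((PySem.List.pyRange 1 (total_boxes + 1) 1).foldl
    (fun (st : Int × Int × List (Int × String × Int × Int)) (box : Int) =>
      let rice := st.1
      let total := st.2.1 + rice
      let formula := if box > 1 then PySem.Int.toStr (PySem.Int.floordiv rice 2) ++ "*2" else "1"
      (rice * 2, total, st.2.2 ++ [(box, formula, rice, total)]))
    (1, 0, [])).2.2

-- ===== PORT B =====
def box_generator_alt (total_boxes : Int) : List (Int × String × Int × Int) :=
  (PySem.List.pyRange 1 (total_boxes + 1) 1).map (fun box =>
    let rice : Int := 2 ^ (box - 1).toNat
    let total : Int := 2 ^ box.toNat - 1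
    let formula := if box > 1 then PySem.Int.toStr (2 ^ (box - 2).toNat) ++ "*2" else "1"
    (box, formula, rice, total))

-- ===== PRECONDITION & SPEC =====
def Spec_box_generator (total_boxes : Int) (out : List (Int × String × Int × Int)) : Prop := out = box_generator_alt total_boxes
instance (total_boxes : Int) (out : List (Int × String × Int × Int)) : Decidable (Spec_box_generator total_boxes out) := by unfold Spec_box_generator; infer_instance

-- ===== CLAIM (what is proved, stated in full; the proofs are below) =====
def Claim_equal_box_generator : Prop := ∀ (total_boxes : Int), Dom_box_generator total_boxes → Spec_box_generator total_boxes (box_generator total_boxes)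

-- ===== LEMMAS AND PROOFS =====

theorem box_gen_invariant (m : Nat) :
    ((List.range m).map (fun k : Nat => (1 : Int) + (k : Int))).foldl
      (fun (st : Int × Int × List (Int × String × Int × Int)) (box : Int) =>
        let rice := st.1
        let total := st.2.1 + rice
        let formula := if box > 1 then PySem.Int.toStr (PySem.Int.floordiv rice 2) ++ "*2" else "1"
        (rice * 2, total, st.2.2 ++ [(box, formula, rice, total)]))
      (1, 0, []) =
    (((2 : Int) ^ m, (2 : Int) ^ m - 1,
      (List.range m).map (fun k : Nat =>
        (((1 : Int) + (k : Int)),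
         (if (1 : Int) + k > 1 then PySem.Int.toStr (2 ^ ((((1:Int) + k) - 2).toNat)) ++ "*2" else "1"),
         (2 : Int) ^ (((1:Int) + k - 1).toNat),
         (2 : Int) ^ (((1:Int) + k).toNat) - 1))) : Int × Int × List (Int × String × Int × Int)) := by
  induction m with
  | zero => simp
  | succ m ih =>
    rw [List.range_succ, List.map_append, List.foldl_append, ih]
    simp only [List.map_cons, List.map_nil, List.foldl_cons, List.foldl_nil, List.map_append]
    refine Prod.ext ?_ (Prod.ext ?_ ?_)
    · show (2:Int) ^ m * 2 = 2 ^ (m+1); ring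
    · show (2:Int) ^ m - 1 + 2 ^ m = 2 ^ (m+1) - 1; ring
    · congr 1
      have h1 : ((1:Int) + m - 1).toNat = m := by omega
      have h2 : ((1:Int) + m).toNat = m + 1 := by omega
      have h3 : (2:Int) ^ m - 1 + 2 ^ m = 2 ^ (m + 1) - 1 := by ring
      have hf : (if (1:Int) + m > 1 then PySem.Int.toStr (PySem.Int.floordiv (2 ^ m) 2) ++ "*2" else "1")
          = (if (1:Int) + m > 1 then PySem.Int.toStr (2 ^ (((1:Int) + m - 2).toNat)) ++ "*2" else "1") := by
        by_cases hm : (1:Int) + m > 1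
        · rw [if_pos hm, if_pos hm]
          have hm' : 1 ≤ m := by omega
          have h4 : ((1:Int) + m - 2).toNat = m - 1 := by omega
          have h5 : (2:Int) ^ m = 2 ^ (m - 1) * 2 := by
            rw [← pow_succ]; congr 1; omega
          rw [h4, PySem.Int.floordiv_eq_ediv_of_pos (by norm_num), h5,
            Int.mul_ediv_cancel _ (by norm_num)]
        · rw [if_neg hm, if_neg hm]
      rw [h1, h2, h3, hf]

-- ===== VERDICT (by name: the statement is the Claim_ definition above) =====
theorem box_generator_spec : Claim_equal_box_generator := by
  intro n _
  show box_generator n = box_generator_alt n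
  unfold box_generator box_generator_alt
  rw [PySem.List.pyRange_one]
  have : n + 1 - 1 = n := by omega
  rw [this, box_gen_invariant]
  rw [List.map_map]
  rfl
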